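-- pv_equiv track=rewrite | github.com/tomato812/toss-hangul-event | toss-hangul-event.py | find_different_word_with_position
-- ===== SOURCE A (Python) =====
-- def find_different_word_with_position(positions):
--     word_counts = {}
--
--     # 단어 빈도 계산
--     for word, position in positions:
--         word_counts[word] = word_counts.get(word, 0) + 1
--
--     # 가장 적게 나온 단어를 찾음
--     for word, position in positions:
--         if word_counts[word] == 1:
--             return word, position
--     return None, None
-- ===== SOURCE B (Python) =====
-- def find_different_word_with_position(positions):
--     candidates = {}
--     disqualified = set()
--     for word, position in positions:
--         if word in disqualified:
--             continue
--         if word in candidates: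
--             del candidates[word]
--             disqualified.add(word)
--         else:
--             candidates[word] = position
--     for word, position in candidates.items():
--         return word, position
--     return None, None
-- ===== Notes on version B (the rewrite author's own statement) =====
-- stated objective: alternative
-- what changed: Replaced the two passes (build a full count dict, then rescan the list) by a single pass maintaining an insertion-ordered candidates dict (word->position) and a disqualified set, answering from the first surviving candidate.
import Mathlib
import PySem

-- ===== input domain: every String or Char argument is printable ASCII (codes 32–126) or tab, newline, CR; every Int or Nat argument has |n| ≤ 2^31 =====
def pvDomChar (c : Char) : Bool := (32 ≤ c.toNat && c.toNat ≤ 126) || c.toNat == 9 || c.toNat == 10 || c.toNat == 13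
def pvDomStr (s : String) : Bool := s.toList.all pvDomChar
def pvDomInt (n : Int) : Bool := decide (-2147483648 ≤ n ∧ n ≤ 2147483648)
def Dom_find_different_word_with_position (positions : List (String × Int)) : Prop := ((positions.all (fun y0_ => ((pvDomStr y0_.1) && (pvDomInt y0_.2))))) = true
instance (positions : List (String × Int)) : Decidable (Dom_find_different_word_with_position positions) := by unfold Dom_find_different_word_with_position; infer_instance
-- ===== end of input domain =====

-- B replaces A's two passes (count dict, then rescan) by ONE pass keeping an ordered
-- candidates dict and a disqualified set; same results, alternative algorithm.

-- ===== PORT A =====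
-- second loop of A: first pair whose word has count 1
def pvFindLoop (wc : PySem.Dict String Int) : List (String × Int) → Option String × Option Int
  | [] => (none, none)
  | wp :: rest =>
      if PySem.Dict.getD wc wp.1 0 = 1 then (some wp.1, some wp.2) else pvFindLoop wc rest

def find_different_word_with_position (positions : List (String × Int)) : Option String × Option Int :=
  let word_counts := positions.foldl
    (fun d wp => PySem.Dict.insert d wp.1 (PySem.Dict.getD d wp.1 0 + 1)) PySem.Dict.empty
  pvFindLoop word_counts positions

-- ===== PORT B =====
-- one step of B's single pass
def pvAltStep (st : PySem.Dict String Int × PySem.Set String) (wp : String × Int) :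
    PySem.Dict String Int × PySem.Set String :=
  if PySem.Set.contains st.2 wp.1 then st
  else if PySem.Dict.contains st.1 wp.1 then
    (PySem.Dict.erase st.1 wp.1, PySem.Set.add st.2 wp.1)
  else (PySem.Dict.insert st.1 wp.1 wp.2, st.2)

def find_different_word_with_position_alt (positions : List (String × Int)) : Option String × Option Int :=
  match PySem.Dict.items (positions.foldl pvAltStep (PySem.Dict.empty, PySem.Set.empty)).1 with
  | [] => (none, none)
  | (w, p) :: _ => (some w, some p)

-- ===== PRECONDITION & SPEC =====
def Spec_find_different_word_with_position (positions : List (String × Int)) (out : Option String × Option Int) : Prop := out = find_different_word_with_position_alt positions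
instance (positions : List (String × Int)) (out : Option String × Option Int) : Decidable (Spec_find_different_word_with_position positions out) := by unfold Spec_find_different_word_with_position; infer_instance

-- ===== CLAIM (what is proved, stated in full; the proofs are below) =====
def Claim_equal_find_different_word_with_position : Prop := ∀ (positions : List (String × Int)), Dom_find_different_word_with_position positions → Spec_find_different_word_with_position positions (find_different_word_with_position positions)

-- ===== LEMMAS AND PROOFS =====

-- number of occurrences of word w in the list
def pvCnt (w : String) (l : List (String × Int)) : Nat := (l.map Prod.fst).count w

def pvPred (full : List (String × Int)) (p : String × Int) : Bool := decide (pvCnt p.1 full = 1)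

lemma pvCnt_append_singleton (w : String) (h : List (String × Int)) (p : String × Int) :
    pvCnt w (h ++ [p]) = pvCnt w h + (if p.1 = w then 1 else 0) := by
  by_cases hw : p.1 = w <;>
    simp [pvCnt, List.count_append, hw]

lemma pvCnt_eq_zero_iff (w : String) (h : List (String × Int)) :
    pvCnt w h = 0 ↔ ∀ q ∈ h, q.1 ≠ w := by
  simp only [pvCnt, List.count_eq_zero, List.mem_map]
  constructor
  · intro hw q hq he; exact hw ⟨q, hq, he⟩
  · rintro hw ⟨q, hq, he⟩; exact hw q hq he

lemma pvCnt_pos_iff (w : String) (h : List (String × Int)) :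
    0 < pvCnt w h ↔ ∃ q ∈ h, q.1 = w := by
  simp [pvCnt, List.count_pos_iff]

-- A's count dict computes pvCnt
lemma pvWc_getD (positions : List (String × Int)) (w : String) :
    PySem.Dict.getD (positions.foldl
      (fun d wp => PySem.Dict.insert d wp.1 (PySem.Dict.getD d wp.1 0 + 1)) PySem.Dict.empty) w 0
      = (pvCnt w positions : Int) := by
  rw [← List.foldl_map (f := Prod.fst)
      (g := fun d k => PySem.Dict.insert d k (PySem.Dict.getD d k 0 + 1)),
    PySem.Dict.getD_foldl_insert_add_one]
  simp [pvCnt]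

-- A's second loop returns the head of the filtered list
lemma pvFindLoop_eq (full : List (String × Int)) (wc : PySem.Dict String Int)
    (hwc : ∀ w, PySem.Dict.getD wc w 0 = (pvCnt w full : Int)) :
    ∀ l : List (String × Int), pvFindLoop wc l =
      (match l.filter (pvPred full) with
       | [] => (none, none)
       | q :: _ => (some q.1, some q.2)) := by
  intro l
  induction l with
  | nil => rfl
  | cons q rest ih =>
      by_cases hq : pvCnt q.1 full = 1
      · simp [pvFindLoop, hwc, hq, pvPred]
      · have : ¬ ((pvCnt q.1 full : Int) = 1) := by exact_mod_cast hq
        simp [pvFindLoop, hwc, this, pvPred, hq, ih]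

-- B's one pass keeps exactly the words seen once so far (with their position, in order)
lemma pvLoop_inv : ∀ (l h : List (String × Int)) (cand : PySem.Dict String Int)
    (disq : PySem.Set String),
    PySem.Dict.items cand = h.filter (pvPred h) →
    (∀ w, PySem.Set.contains disq w = true ↔ 2 ≤ pvCnt w h) →
    PySem.Dict.items (l.foldl pvAltStep (cand, disq)).1 = (h ++ l).filter (pvPred (h ++ l)) := by
  intro l
  induction l with
  | nil => intro h cand disq hc _; simpa using hc
  | cons p rest ih =>
      intro h cand disq hc hd
      have hcand_iff : PySem.Dict.contains cand p.1 = true ↔ pvCnt p.1 h = 1 := by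
        simp only [PySem.Dict.contains, List.any_eq_true, hc, List.mem_filter, pvPred,
          beq_iff_eq, decide_eq_true_eq]
        constructor
        · rintro ⟨q, ⟨_, h1⟩, he⟩; rwa [he] at h1
        · intro h1
          obtain ⟨q, hq, he⟩ := (pvCnt_pos_iff p.1 h).1 (by omega)
          exact ⟨q, ⟨hq, by rwa [he]⟩, he⟩
      have hassoc : h ++ p :: rest = (h ++ [p]) ++ rest := by simp
      rw [hassoc, List.foldl_cons]
      by_cases hdq : PySem.Set.contains disq p.1 = true
      -- word already disqualified: state unchanged
      · have hc2 : 2 ≤ pvCnt p.1 h := (hd p.1).1 hdq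
        have hmem : p.1 ∈ disq := (PySem.Set.contains_iff _ _).1 hdq
        have hstep : pvAltStep (cand, disq) p = (cand, disq) := by simp [pvAltStep, hmem]
        rw [hstep]
        refine ih (h ++ [p]) cand disq ?_ ?_
        · rw [hc, List.filter_append]
          have hp : pvPred (h ++ [p]) p = false := by
            simp only [pvPred, pvCnt_append_singleton]
            simp; omega
          have hfe : h.filter (pvPred (h ++ [p])) = h.filter (pvPred h) := by
            apply List.filter_congr; intro q hq
            by_cases hqp : p.1 = q.1
            · have hcq : pvCnt q.1 h = pvCnt p.1 h := by rw [hqp]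
              simp only [pvPred, pvCnt_append_singleton, if_pos hqp, hcq]
              simp; omega
            · simp [pvPred, pvCnt_append_singleton, hqp]
          simp [hfe, hp]
        · intro w
          rw [pvCnt_append_singleton]
          by_cases hw : p.1 = w
          · rw [if_pos hw, ← hw]
            exact ⟨fun _ => by omega, fun _ => hdq⟩
          · rw [if_neg hw, Nat.add_zero]
            exact hd w
      · by_cases hcd : PySem.Dict.contains cand p.1 = true
        -- second occurrence: remove candidate, disqualify
        · have hc1 : pvCnt p.1 h = 1 := hcand_iff.1 hcd
          have hnmem : p.1 ∉ disq := fun hm => hdq ((PySem.Set.contains_iff _ _).2 hm)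
          have hstep : pvAltStep (cand, disq) p =
              (PySem.Dict.erase cand p.1, PySem.Set.add disq p.1) := by
            simp [pvAltStep, hnmem, hcd]
          rw [hstep]
          refine ih (h ++ [p]) _ _ ?_ ?_
          · show (PySem.Dict.items cand).filter (fun q => !(q.1 == p.1))
                = (h ++ [p]).filter (pvPred (h ++ [p]))
            rw [hc, List.filter_filter, List.filter_append]
            have hp : pvPred (h ++ [p]) p = false := by
              simp only [pvPred, pvCnt_append_singleton, hc1]
              simp
            have hfe : h.filter (fun q => !(q.1 == p.1) && pvPred h q)
                = h.filter (pvPred (h ++ [p])) := by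
              apply List.filter_congr; intro q hq
              by_cases hqp : p.1 = q.1
              · have hcq : pvCnt q.1 h = pvCnt p.1 h := by rw [hqp]
                simp only [pvPred, pvCnt_append_singleton, if_pos hqp, hcq, hc1]
                simp [← hqp]
              · have : ¬ (q.1 == p.1) = true := by
                  simp; exact fun he => hqp he.symm
                simp [pvPred, pvCnt_append_singleton, hqp, this]
            simp [hfe, hp]
          · intro w
            rw [show (PySem.Set.contains (PySem.Set.add disq p.1) w = true)
                  ↔ (w ∈ PySem.Set.add disq p.1) from PySem.Set.contains_iff _ _,
              PySem.Set.mem_add, pvCnt_append_singleton]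
            by_cases hw : p.1 = w
            · rw [if_pos hw, ← hw, hc1]
              exact ⟨fun _ => by omega, fun _ => Or.inr rfl⟩
            · rw [if_neg hw, Nat.add_zero]
              constructor
              · rintro (hmem | he)
                · exact (hd w).1 ((PySem.Set.contains_iff _ _).2 hmem)
                · exact absurd he.symm hw
              · intro hh
                exact Or.inl ((PySem.Set.contains_iff _ _).1 ((hd w).2 hh))
        -- first occurrence: new candidate
        · have hc0 : pvCnt p.1 h = 0 := by
            have h1 : pvCnt p.1 h ≠ 1 := fun he => hcd (hcand_iff.2 he)
            have h2 : ¬ 2 ≤ pvCnt p.1 h := fun hge => hdq ((hd p.1).2 hge)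
            omega
          have hnmem : p.1 ∉ disq := fun hm => hdq ((PySem.Set.contains_iff _ _).2 hm)
          have hstep : pvAltStep (cand, disq) p =
              (PySem.Dict.insert cand p.1 p.2, disq) := by
            simp [pvAltStep, hnmem, hcd]
          rw [hstep]
          refine ih (h ++ [p]) _ _ ?_ ?_
          · rw [PySem.Dict.items_insert_of_not_contains cand p.2
                  (Bool.not_eq_true _ ▸ hcd : cand.contains p.1 = false),
              hc, List.filter_append]
            have hnokey := (pvCnt_eq_zero_iff p.1 h).1 hc0
            have hp : pvPred (h ++ [p]) p = true := by
              simp [pvPred, pvCnt_append_singleton, hc0]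
            have hfe : h.filter (pvPred h) = h.filter (pvPred (h ++ [p])) := by
              apply List.filter_congr; intro q hq
              have hqp : ¬ p.1 = q.1 := fun he => hnokey q hq he.symm
              simp [pvPred, pvCnt_append_singleton, hqp]
            simp [hfe, hp]
          · intro w
            rw [pvCnt_append_singleton]
            by_cases hw : p.1 = w
            · rw [if_pos hw, ← hw, hc0]
              exact ⟨fun hm => absurd hm hdq, fun hh => absurd hh (by omega)⟩
            · rw [if_neg hw, Nat.add_zero]
              exact hd w

theorem pvB_eq (positions : List (String × Int)) :
    find_different_word_with_position_alt positions =
      (match positions.filter (pvPred positions) with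
       | [] => (none, none)
       | q :: _ => (some q.1, some q.2)) := by
  have h := pvLoop_inv positions [] PySem.Dict.empty PySem.Set.empty (by rfl)
    (by intro w; simp [PySem.Set.contains, pvCnt])
  simp only [List.nil_append] at h
  unfold find_different_word_with_position_alt
  rw [h]

  cases hf : positions.filter (pvPred positions) <;> simp

-- ===== VERDICT (by name: the statement is the Claim_ definition above) =====
theorem find_different_word_with_position_spec : Claim_equal_find_different_word_with_position := by
  intro positions _
  unfold Spec_find_different_word_with_position find_different_word_with_position
  rw [pvB_eq, pvFindLoop_eq positions _ (pvWc_getD positions)]
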